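-- pv_equiv track=rewrite | github.com/ku-milab/Decoding-Multifaceted-Adult-Fluid-Intelligence-with-Machine-Learning | Tree_based_models/Interpret/randomforest_shap_feature_importance_knee_based.py | match_base
-- ===== SOURCE A (Python) =====
-- def match_base(rest: str, candidates):
--     hit, best = None, -1
--     for cand in candidates:
--         if rest == cand or rest.startswith(cand + "_"):
--             if len(cand) > best:
--                 best = len(cand)
--                 hit = cand
--     return hit
-- ===== SOURCE B (Python) =====
-- def match_base(rest: str, candidates):
--     # Probe prefixes of `rest` at underscore boundaries, longest first,
--     # against a hash set of the candidates.
--     cs = set(candidates)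
--     if rest in cs:
--         return rest
--     for i in range(len(rest) - 1, -1, -1):
--         if rest[i] == "_" and rest[:i] in cs:
--             return rest[:i]
--     return None
-- ===== Notes on version B (the rewrite author's own statement) =====
-- stated objective: alternative
-- what changed: Instead of testing every candidate against rest, B builds a hash set of the candidates once and probes the prefixes of rest that end at underscore boundaries, longest first, returning the first hit.
import Mathlib
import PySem

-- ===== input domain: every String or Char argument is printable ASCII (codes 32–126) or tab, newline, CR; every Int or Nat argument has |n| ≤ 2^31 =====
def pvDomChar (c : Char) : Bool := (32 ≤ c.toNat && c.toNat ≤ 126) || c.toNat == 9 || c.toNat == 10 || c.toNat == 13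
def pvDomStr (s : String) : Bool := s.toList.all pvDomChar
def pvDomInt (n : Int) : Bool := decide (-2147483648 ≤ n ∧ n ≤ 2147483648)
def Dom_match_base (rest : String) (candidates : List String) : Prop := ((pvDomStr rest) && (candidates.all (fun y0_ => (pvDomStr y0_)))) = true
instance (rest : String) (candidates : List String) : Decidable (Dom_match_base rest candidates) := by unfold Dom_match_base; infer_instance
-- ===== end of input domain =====

-- B replaces A's scan over all candidates by a hash-set of the candidates probed with the
-- prefixes of `rest` ending at underscore boundaries, longest first (objective: alternative).

-- ===== PORT A =====
-- the body of A's `for cand in candidates` loop, acting on the state (hit, best)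
def matchStep (rest : String) (st : Option String × Int) (cand : String) : Option String × Int :=
  if rest == cand || PySem.Str.startswith rest (cand ++ "_") then
    if PySem.Str.len cand > st.2 then (some cand, PySem.Str.len cand) else st
  else st

def match_base (rest : String) (candidates : List String) : Option String :=
  (candidates.foldl (matchStep rest) (none, -1)).1

-- ===== PORT B =====
-- B's `for i in range(len(rest)-1, -1, -1)` loop over the characters of `rest`
-- (ported on `rest.toList`; `rest[i]` is `r[i]?`, `rest[:i]` is `r.take i` — exact for i in range)
def matchAltScan (r : List Char) (cs : PySem.Set String) : Nat → Option String
  | 0 => none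
  | i + 1 =>
    if r[i]? = some '_' ∧ String.ofList (r.take i) ∈ cs then some (String.ofList (r.take i))
    else matchAltScan r cs i

def match_base_alt (rest : String) (candidates : List String) : Option String :=
  let cs : PySem.Set String := PySem.Set.ofList candidates
  if rest ∈ cs then some rest
  else matchAltScan rest.toList cs rest.toList.length

-- ===== PRECONDITION & SPEC =====
def Spec_match_base (rest : String) (candidates : List String) (out : Option String) : Prop := out = match_base_alt rest candidates
instance (rest : String) (candidates : List String) (out : Option String) : Decidable (Spec_match_base rest candidates out) := by unfold Spec_match_base; infer_instance

-- ===== CLAIM (what is proved, stated in full; the proofs are below) =====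
def Claim_equal_match_base : Prop := ∀ (rest : String) (candidates : List String), Dom_match_base rest candidates → Spec_match_base rest candidates (match_base rest candidates)

-- ===== LEMMAS AND PROOFS =====

-- `k` is a "match length" for `rest` against the candidate pool `cs`
def okP (rest : String) (cs : List String) (k : Nat) : Prop :=
  (k = rest.toList.length ∧ rest ∈ cs) ∨
  (rest.toList[k]? = some '_' ∧ String.ofList (rest.toList.take k) ∈ cs)

theorem okP_le (rest : String) (cs : List String) (k : Nat) (h : okP rest cs k) :
    k ≤ rest.toList.length := by
  rcases h with ⟨h, -⟩ | ⟨h, -⟩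
  · omega
  · exact le_of_lt (List.getElem?_eq_some_iff.mp h).1

theorem prefix_snoc_iff (l r : List Char) (c : Char) :
    l ++ [c] <+: r ↔ l <+: r ∧ r[l.length]? = some c := by
  constructor
  · rintro ⟨t, rfl⟩
    rw [List.append_assoc]
    refine ⟨⟨[c] ++ t, rfl⟩, ?_⟩
    rw [List.getElem?_append_right le_rfl]
    simp
  · rintro ⟨⟨t, rfl⟩, hg⟩
    rw [List.getElem?_append_right le_rfl] at hg
    simp only [Nat.sub_self] at hg
    rcases t with _ | ⟨x, t⟩
    · simp at hg
    · simp only [List.getElem?_cons_zero, Option.some.injEq] at hg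
      subst hg
      exact ⟨t, by simp⟩

-- A's test `rest == cand or rest.startswith(cand + "_")`
def mcond (rest cand : String) : Bool :=
  rest == cand || PySem.Str.startswith rest (cand ++ "_")

theorem mcond_iff (rest c : String) :
    mcond rest c = true ↔
      c.toList <+: rest.toList ∧
        (c.toList.length = rest.toList.length ∨ rest.toList[c.toList.length]? = some '_') := by
  unfold mcond
  rw [Bool.or_eq_true, beq_iff_eq, PySem.Str.startswith_eq, PySem.Chars.startswith_iff]
  have happ : (c ++ "_").toList = c.toList ++ ['_'] := by simp
  rw [happ, prefix_snoc_iff]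
  constructor
  · rintro (rfl | ⟨hp, hg⟩)
    · exact ⟨List.prefix_rfl, Or.inl rfl⟩
    · exact ⟨hp, Or.inr hg⟩
  · rintro ⟨hp, hlen | hg⟩
    · exact Or.inl (String.toList_injective (hp.eq_of_length hlen)).symm
    · exact Or.inr ⟨hp, hg⟩

theorem okP_single (rest c : String) (k : Nat) (h : okP rest [c] k) :
    mcond rest c = true ∧ k = c.toList.length ∧ c = String.ofList (rest.toList.take k) := by
  rcases h with ⟨hk, hm⟩ | ⟨hg, hm⟩
  · simp only [List.mem_singleton] at hm
    subst hm
    refine ⟨by simp [mcond], hk, ?_⟩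
    subst hk
    rw [List.take_length, String.ofList_toList]
  · simp only [List.mem_singleton] at hm
    have hlt : k < rest.toList.length := (List.getElem?_eq_some_iff.mp hg).1
    have hlen : c.toList.length = k := by
      rw [← hm, String.toList_ofList, List.length_take]
      omega
    refine ⟨?_, hlen.symm, hm.symm⟩
    rw [mcond_iff]
    refine ⟨?_, Or.inr (by rw [hlen]; exact hg)⟩
    rw [← hm]; simp [List.take_prefix]

theorem okP_of_mcond (rest c : String) (h : mcond rest c = true) (cs : List String)
    (hm : c ∈ cs) : okP rest cs c.toList.length ∧ c = String.ofList (rest.toList.take c.toList.length) := by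
  rw [mcond_iff] at h
  obtain ⟨hp, hrest⟩ := h
  have htake : c.toList = rest.toList.take c.toList.length := by
    rw [List.prefix_iff_eq_take] at hp; exact hp
  have hc : c = String.ofList (rest.toList.take c.toList.length) := by
    rw [← htake]; simp
  refine ⟨?_, hc⟩
  rcases hrest with hlen | hg
  · left
    refine ⟨hlen, ?_⟩
    have : c = rest := String.toList_injective (hp.eq_of_length hlen)
    exact this ▸ hm
  · right
    exact ⟨hg, hc ▸ hm⟩

theorem okP_append_singleton (rest : String) (p : List String) (c : String) (k : Nat) :
    okP rest (p ++ [c]) k ↔ okP rest p k ∨ okP rest [c] k := by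
  unfold okP
  simp only [List.mem_append, List.mem_singleton]
  tauto

-- A's loop invariant: the state after processing `p` is the longest match found in `p`
def AInv (rest : String) (p : List String) (st : Option String × Int) : Prop :=
  (st = (none, -1) ∧ ∀ k, ¬ okP rest p k) ∨
  (∃ k, okP rest p k ∧ st = (some (String.ofList (rest.toList.take k)), (k : Int)) ∧
    ∀ k', okP rest p k' → k' ≤ k)

theorem stepAInv (rest : String) (p : List String) (c : String) (st : Option String × Int)
    (h : AInv rest p st) : AInv rest (p ++ [c]) (matchStep rest st c) := by
  unfold matchStep
  by_cases hc : mcond rest c = true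
  · have hc' := hc
    unfold mcond at hc'
    rw [if_pos hc', PySem.Str.len_eq]
    obtain ⟨hok, hcval⟩ := okP_of_mcond rest c hc (p ++ [c]) (by simp)
    rcases h with ⟨rfl, hnone⟩ | ⟨k, hk, rfl, hmax⟩
    · rw [if_pos (show ((-1 : Int) < (c.toList.length : Int)) by omega)]
      right
      refine ⟨c.toList.length, hok, ?_, ?_⟩
      · rw [← hcval]
      · intro k' hk'
        rcases (okP_append_singleton rest p c k').mp hk' with h' | h'
        · exact absurd h' (hnone k')
        · exact le_of_eq (okP_single rest c k' h').2.1
    · by_cases hgt : (k : Int) < (c.toList.length : Int)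
      · rw [if_pos hgt]
        right
        refine ⟨c.toList.length, hok, ?_, ?_⟩
        · rw [← hcval]
        · intro k' hk'
          rcases (okP_append_singleton rest p c k').mp hk' with h' | h'
          · have h1 := hmax k' h'
            omega
          · exact le_of_eq (okP_single rest c k' h').2.1
      · rw [if_neg hgt]
        right
        refine ⟨k, (okP_append_singleton rest p c k).mpr (Or.inl hk), rfl, ?_⟩
        intro k' hk'
        rcases (okP_append_singleton rest p c k').mp hk' with h' | h'
        · exact hmax k' h'
        · have h2 := (okP_single rest c k' h').2.1
          omega
  · have hc' : ¬ (rest == c || PySem.Str.startswith rest (c ++ "_")) = true := by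
      unfold mcond at hc; exact hc
    rw [if_neg hc']
    have hdrop : ∀ k, okP rest (p ++ [c]) k → okP rest p k := by
      intro k hk
      rcases (okP_append_singleton rest p c k).mp hk with h' | h'
      · exact h'
      · exact absurd (okP_single rest c k h').1 hc
    rcases h with ⟨rfl, hnone⟩ | ⟨k, hk, rfl, hmax⟩
    · exact Or.inl ⟨rfl, fun k hk => hnone k (hdrop k hk)⟩
    · exact Or.inr ⟨k, (okP_append_singleton rest p c k).mpr (Or.inl hk), rfl,
        fun k' hk' => hmax k' (hdrop k' hk')⟩

theorem foldAInv (rest : String) (l : List String) :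
    ∀ (p : List String) (st : Option String × Int), AInv rest p st →
      AInv rest (p ++ l) (l.foldl (matchStep rest) st) := by
  induction l with
  | nil => intro p st h; simpa using h
  | cons c l ih =>
    intro p st h
    have := ih (p ++ [c]) (matchStep rest st c) (stepAInv rest p c st h)
    simpa using this

theorem ainv_init (rest : String) : AInv rest [] ((none, -1) : Option String × Int) := by
  left
  refine ⟨rfl, fun k hk => ?_⟩
  rcases hk with ⟨-, hm⟩ | ⟨-, hm⟩ <;> simp at hm

-- B's scan characterization
theorem scan_none (r : List Char) (cs : PySem.Set String) :
    ∀ n, (∀ i, i < n → ¬ (r[i]? = some '_' ∧ String.ofList (r.take i) ∈ cs)) →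
      matchAltScan r cs n = none := by
  intro n
  induction n with
  | zero => intro _; rfl
  | succ i ih =>
    intro h
    unfold matchAltScan
    rw [if_neg (h i (Nat.lt_succ_self i))]
    exact ih (fun j hj => h j (Nat.lt_succ_of_lt hj))

theorem scan_some (r : List Char) (cs : PySem.Set String) (i : Nat)
    (hit : r[i]? = some '_' ∧ String.ofList (r.take i) ∈ cs) :
    ∀ n, i < n → (∀ j, i < j → j < n → ¬ (r[j]? = some '_' ∧ String.ofList (r.take j) ∈ cs)) →
      matchAltScan r cs n = some (String.ofList (r.take i)) := by
  intro n
  induction n with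
  | zero => omega
  | succ m ih =>
    intro hin hmax
    unfold matchAltScan
    by_cases him : i = m
    · subst him
      rw [if_pos hit]
    · have him' : i < m := by omega
      rw [if_neg (hmax m him' (Nat.lt_succ_self m))]
      exact ih him' (fun j hj1 hj2 => hmax j hj1 (Nat.lt_succ_of_lt hj2))

-- ===== VERDICT (by name: the statement is the Claim_ definition above) =====
theorem match_base_spec : Claim_equal_match_base := by
  intro rest candidates _
  unfold Spec_match_base match_base match_base_alt
  show (candidates.foldl (matchStep rest) (none, -1)).1 =
    if rest ∈ PySem.Set.ofList candidates then some rest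
    else matchAltScan rest.toList (PySem.Set.ofList candidates) rest.toList.length
  have hinv := foldAInv rest candidates [] (none, -1) (ainv_init rest)
  simp only [List.nil_append] at hinv
  by_cases hrest : rest ∈ PySem.Set.ofList candidates
  · rw [if_pos hrest]
    have hmem : rest ∈ candidates := (PySem.Set.mem_ofList _ _).mp hrest
    have hok : okP rest candidates rest.toList.length := Or.inl ⟨rfl, hmem⟩
    rcases hinv with ⟨-, hnone⟩ | ⟨k, hk, hst, hmax⟩
    · exact absurd hok (hnone _)
    · have hkeq : k = rest.toList.length :=
        le_antisymm (okP_le rest candidates k hk) (hmax _ hok)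
      rw [hst]
      subst hkeq
      rw [List.take_length, String.ofList_toList]
  · rw [if_neg hrest]
    have hnm : rest ∉ candidates := fun h => hrest ((PySem.Set.mem_ofList _ _).mpr h)
    have hcond : ∀ i, (rest.toList[i]? = some '_' ∧
        String.ofList (rest.toList.take i) ∈ PySem.Set.ofList candidates) ↔
        okP rest candidates i := by
      intro i
      rw [PySem.Set.mem_ofList]
      constructor
      · exact fun h => Or.inr h
      · rintro (⟨-, hm⟩ | h)
        · exact absurd hm hnm
        · exact h
    rcases hinv with ⟨hst, hnone⟩ | ⟨k, hk, hst, hmax⟩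
    · rw [hst, scan_none rest.toList _ rest.toList.length
        (fun i _ h => hnone i ((hcond i).mp h))]
    · have hk' := hk
      rcases hk' with ⟨-, hm⟩ | ⟨hg, -⟩
      · exact absurd hm hnm
      have hklt : k < rest.toList.length := (List.getElem?_eq_some_iff.mp hg).1
      rw [hst, scan_some rest.toList _ k ((hcond k).mpr hk) rest.toList.length hklt
        (fun j hj1 _ hc => absurd (hmax j ((hcond j).mp hc)) (by omega))]
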